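-- pv_equiv track=rewrite | github.com/AneeshBonthala/team_script | team_builder.py | get_num_dupe_types
-- ===== SOURCE A (Python) =====
-- def get_num_dupe_types(team):
--     dupes = {}
--     for pkmn in team:
--         for type in pkmn['Types']:
--             if type not in dupes:
--                 dupes[type] = 1
--             else:
--                 dupes[type] += 1
--     counter = 0
--     for value in dupes.values():
--         counter += value - 1
--     return counter
-- ===== SOURCE B (Python) =====
-- def get_num_dupe_types(team):
--     types = sorted(t for pkmn in team for t in pkmn['Types'])
--     dupes = 0
--     for prev, cur in zip(types, types[1:]):
--         if prev == cur:
--             dupes += 1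
--     return dupes
-- ===== Notes on version B (the rewrite author's own statement) =====
-- stated objective: alternative
-- what changed: Drops the frequency dict and the (value-1) summation entirely: flattens all types, sorts them, and counts adjacent equal pairs in the sorted list (each duplicate occurrence sits next to an earlier equal one exactly once).
import Mathlib
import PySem

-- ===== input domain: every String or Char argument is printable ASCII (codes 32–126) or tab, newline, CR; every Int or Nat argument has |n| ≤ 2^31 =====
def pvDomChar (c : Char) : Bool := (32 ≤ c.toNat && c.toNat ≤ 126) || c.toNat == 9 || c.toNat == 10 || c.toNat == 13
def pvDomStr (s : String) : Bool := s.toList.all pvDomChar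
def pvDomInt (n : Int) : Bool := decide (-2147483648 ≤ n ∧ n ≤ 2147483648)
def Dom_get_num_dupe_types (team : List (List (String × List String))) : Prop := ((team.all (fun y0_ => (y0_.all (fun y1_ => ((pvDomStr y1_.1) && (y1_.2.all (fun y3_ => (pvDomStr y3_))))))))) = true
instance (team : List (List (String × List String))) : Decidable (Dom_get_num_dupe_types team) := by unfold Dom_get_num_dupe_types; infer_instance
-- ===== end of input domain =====

-- B replaces the frequency dict + (value-1) summation by sort-then-scan: flatten all types,
-- sort them, and count adjacent equal pairs (alternative algorithm, same result).

-- ===== PORT A =====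
-- pkmn['Types']: total lookup, exact under Pre_ (key present)
def pvTypesOf (pkmn : List (String × List String)) : List String :=
  ((PySem.Dict.ofList pkmn).get? "Types").getD []

def get_num_dupe_types (team : List (List (String × List String))) : Int :=
  let dupes : PySem.Dict String Int :=
    team.foldl (fun dupes pkmn =>
      (pvTypesOf pkmn).foldl (fun dupes t =>
        if (dupes.contains t) = false then dupes.insert t 1
        else dupes.insert t (dupes.getD t 0 + 1)) dupes) PySem.Dict.empty
  dupes.values.foldl (fun counter v => counter + (v - 1)) 0

-- ===== PORT B =====
def get_num_dupe_types_alt (team : List (List (String × List String))) : Int :=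
  let types := PySem.List.sorted (team.flatMap pvTypesOf) (fun x => x) false
  -- zip(types, types[1:]); types[1:] = drop 1 (nonnegative start slice)
  (types.zip (types.drop 1)).foldl
    (fun dupes pc => if pc.1 == pc.2 then dupes + 1 else dupes) 0

-- ===== PRECONDITION & SPEC =====
-- Pre_: every team member's dict has the key 'Types' (otherwise Python A raises KeyError)
def Pre_get_num_dupe_types (team : List (List (String × List String))) : Prop :=
  ∀ pkmn ∈ team, (PySem.Dict.ofList pkmn).contains "Types" = true
instance (team : List (List (String × List String))) : Decidable (Pre_get_num_dupe_types team) := by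
  unfold Pre_get_num_dupe_types; infer_instance
def pvWitness_get_num_dupe_types : (List (List (String × List String))) :=
  [[("Types", ["Fire", "Water"])], [("Types", ["Fire"])]]
def Spec_get_num_dupe_types (team : List (List (String × List String))) (out : Int) : Prop := out = get_num_dupe_types_alt team
instance (team : List (List (String × List String))) (out : Int) : Decidable (Spec_get_num_dupe_types team out) := by unfold Spec_get_num_dupe_types; infer_instance

-- ===== CLAIM (what is proved, stated in full; the proofs are below) =====
def Claim_equal_get_num_dupe_types : Prop := ∀ (team : List (List (String × List String))), Dom_get_num_dupe_types team → Pre_get_num_dupe_types team → Spec_get_num_dupe_types team (get_num_dupe_types team)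

-- ===== LEMMAS AND PROOFS =====

-- a nested fold over a list of lists is a fold over the flattened list
theorem pv_foldl_flat {β : Type} (g : β → String → β) (team : List (List (String × List String))) (init : β) :
    team.foldl (fun b p => (pvTypesOf p).foldl g b) init
      = (team.flatMap pvTypesOf).foldl g init := by
  induction team generalizing init with
  | nil => rfl
  | cons p rest ih => simp [List.foldl_append, ih]

-- A's two branches are the same insert
theorem pv_stepA_eq (d : PySem.Dict String Int) (t : String) :
    (if (d.contains t) = false then d.insert t 1 else d.insert t (d.getD t 0 + 1))
      = d.insert t (d.getD t 0 + 1) := by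
  by_cases h : d.contains t = false
  · simp [h, PySem.Dict.getD_of_not_contains d 0 h]
  · simp [h]

theorem pv_sum_sub (L : List Int) (c : Int) :
    L.foldl (fun counter v => counter + (v - 1)) c = c + L.sum - L.length := by
  induction L generalizing c with
  | nil => simp
  | cons v rest ih => simp [List.foldl_cons, ih]; ring

-- A's result in closed form: occurrences minus distinct types
theorem pv_A_closed (xs : List String) :
    ((PySem.Dict.counter xs).values).foldl (fun counter v => counter + (v - 1)) 0
      = (xs.length : Int) - (xs.dedup.length : Int) := by
  have hv : (PySem.Dict.counter xs).values
      = (PySem.Set.ofList xs).map (fun k => (xs.count k : Int)) := by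
    have := PySem.Dict.items_counter (xs := xs)
    simp [PySem.Dict.values, this]
  rw [hv, pv_sum_sub]
  have hperm : (PySem.Set.ofList xs).Perm xs.dedup := by
    apply (List.perm_ext_iff_of_nodup (PySem.Set.nodup_ofList xs) xs.nodup_dedup).2
    intro a; simp [PySem.Set.mem_ofList, List.mem_dedup]
  have hsum : ((PySem.Set.ofList xs).map (fun k => (xs.count k : Int))).sum
      = (xs.dedup.map (fun k => (xs.count k : Int))).sum :=
    List.Perm.sum_eq (hperm.map _)
  have hlen2 : (xs.dedup.map fun x => xs.count x).sum = xs.length :=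
    List.sum_map_count_dedup_eq_length xs
  have hlen : ((PySem.Set.ofList xs).map (fun k => (xs.count k : Int))).sum = (xs.length : Int) := by
    have hm : xs.dedup.map (fun k => (xs.count k : Int))
        = (xs.dedup.map fun x => xs.count x).map Nat.cast := by
      simp [List.map_map]
    rw [hsum, hm, ← Nat.cast_list_sum, hlen2]
  rw [hlen]
  simp [List.length_map, hperm.length_eq]

theorem pv_A_fold (xs : List String) :
    xs.foldl (fun (dupes : PySem.Dict String Int) t =>
        if (dupes.contains t) = false then dupes.insert t 1
        else dupes.insert t (dupes.getD t 0 + 1)) PySem.Dict.empty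
      = PySem.Dict.counter xs := by
  have h : xs.foldl (fun (dupes : PySem.Dict String Int) t =>
        if (dupes.contains t) = false then dupes.insert t 1
        else dupes.insert t (dupes.getD t 0 + 1)) PySem.Dict.empty
      = xs.foldl (fun (d : PySem.Dict String Int) t => d.insert t (d.getD t 0 + 1)) PySem.Dict.empty := by
    apply List.foldl_ext
    intro d t _; exact pv_stepA_eq d t
  rw [h, PySem.Dict.foldl_insert_getD_add_one_eq_counter]

-- the adjacent-equal fold is the countP of the pair list
theorem pv_adj_foldl_count (ps : List (String × String)) (c : Int) :
    ps.foldl (fun dupes pc => if pc.1 == pc.2 then dupes + 1 else dupes) c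
      = c + (ps.countP (fun pc => pc.1 == pc.2) : Int) := by
  induction ps generalizing c with
  | nil => simp
  | cons p rest ih =>
    rw [List.foldl_cons, List.countP_cons, ih]
    by_cases h : (p.1 == p.2) = true <;> simp [h] <;> ring

-- on a ≤-sorted list, adjacent equal pairs count = length - number of distinct values
theorem pv_adj_sorted (l : List String) (hl : l.Pairwise (· ≤ ·)) :
    ((l.zip (l.drop 1)).countP (fun pc => pc.1 == pc.2)) + l.dedup.length = l.length := by
  induction l with
  | nil => simp
  | cons a t ih =>
    cases t with
    | nil => simp
    | cons b rest =>
      have ha : ∀ x ∈ b :: rest, a ≤ x := fun x hx => (List.pairwise_cons.1 hl).1 x hx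
      have htail : (b :: rest).Pairwise (· ≤ ·) := (List.pairwise_cons.1 hl).2
      have ih' := ih htail
      by_cases hab : a = b
      · have hmem : a ∈ b :: rest := by simp [hab]
        rw [List.dedup_cons_of_mem hmem]
        simp only [List.drop_succ_cons, List.drop_zero, List.zip_cons_cons, List.countP_cons]
        simp only [List.drop_succ_cons, List.drop_zero] at ih'
        simp [hab] at ih' ⊢
        omega
      · have hnmem : a ∉ b :: rest := by
          intro hmem
          rcases List.mem_cons.1 hmem with h | h
          · exact hab h
          · have hba : b ≤ a := (List.pairwise_cons.1 htail).1 a h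
            exact hab (le_antisymm (ha b (by simp)) hba)
        rw [List.dedup_cons_of_notMem hnmem]
        simp only [List.drop_succ_cons, List.drop_zero, List.zip_cons_cons, List.countP_cons]
        simp only [List.drop_succ_cons, List.drop_zero] at ih'
        simp [hab] at ih' ⊢
        omega

-- ===== VERDICT (by name: the statement is the Claim_ definition above) =====
theorem get_num_dupe_types_spec : Claim_equal_get_num_dupe_types := by
  intro team _ _
  unfold Spec_get_num_dupe_types get_num_dupe_types get_num_dupe_types_alt
  rw [pv_foldl_flat, pv_A_fold, pv_A_closed]
  set xs := team.flatMap pvTypesOf with hxs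
  set s := PySem.List.sorted xs (fun x => x) false with hs
  have hperm : s.Perm xs := PySem.List.sorted_perm xs (fun x => x) false
  have hpw : s.Pairwise (· ≤ ·) := by
    simpa using PySem.List.sorted_pairwise (xs := xs) (key := fun x => x)
  have hadj := pv_adj_sorted s hpw
  rw [pv_adj_foldl_count]
  have hlen : s.length = xs.length := hperm.length_eq
  have hded : s.dedup.length = xs.dedup.length := hperm.dedup.length_eq
  omega
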